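-- pv_equiv track=rewrite | github.com/AndrewPlatov/JavaScript411_Pshenichny | Python/3 April 2025 Homework/bad_or_good_1.0.py | replace_bad_with_good
-- ===== SOURCE A (Python) =====
-- def replace_bad_with_good(text):
--     # Определяем символы для замены
--     bad = "bad"
--     good = "good"
--
--     # Получаем длину слова 'bad'
--     bad_length = len(bad)
--
--     # Создаем список для результата
--     result = []
--
--     i = 0
--     while i < len(text):
--         # Проверяем, совпадает ли текущая подстрока с 'bad'
--         if text[i:i + bad_length] == bad:
--             # Если совпадает, добавляем 'good' в результат
--             result.extend(good)
--             i += bad_length  # Пропускаем длину 'bad'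
--         else:
--             # Если не совпадает, добавляем текущий символ в результат
--             result.append(text[i])
--             i += 1  # Переходим к следующему символу
--
--     # Преобразуем список обратно в строку
--     return ''.join(result)
-- ===== SOURCE B (Python) =====
-- def replace_bad_with_good(text):
--     # Tokenize on the literal "bad", then stitch the segments with "good".
--     return "good".join(text.split("bad"))
-- ===== Notes on version B (the rewrite author's own statement) =====
-- stated objective: idiomatic
-- what changed: Replaces the char-by-char index loop with a two-phase tokenize-then-stitch: split the text on the pattern and join the segments with the replacement.
import Mathlib
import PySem

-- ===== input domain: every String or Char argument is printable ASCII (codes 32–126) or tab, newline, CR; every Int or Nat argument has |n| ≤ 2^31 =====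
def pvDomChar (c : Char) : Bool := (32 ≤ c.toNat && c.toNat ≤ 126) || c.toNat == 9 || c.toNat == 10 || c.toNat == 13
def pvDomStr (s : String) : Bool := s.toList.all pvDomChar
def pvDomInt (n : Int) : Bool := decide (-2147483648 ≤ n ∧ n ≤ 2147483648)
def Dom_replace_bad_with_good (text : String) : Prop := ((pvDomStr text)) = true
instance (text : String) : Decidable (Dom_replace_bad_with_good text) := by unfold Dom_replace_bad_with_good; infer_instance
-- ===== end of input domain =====

-- B replaces A's char-by-char index loop with split-on-"bad" then join-with-"good" (idiomatic).

-- ===== PORT A =====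
-- the while loop over index i, ported as structural recursion over the remaining suffix
-- (text[i:i+3] is the slice of the suffix from 0 to 3); result chars are emitted in order.
def pvLoopA : List Char → List Char
  | [] => []
  | c :: rest =>
    if PySem.List.slice (c :: rest) (some 0) (some 3) = ['b', 'a', 'd'] then
      'g' :: 'o' :: 'o' :: 'd' :: pvLoopA (rest.drop 2)   -- i += 3
    else
      c :: pvLoopA rest                                    -- i += 1
  termination_by cs => cs.length
  decreasing_by
    all_goals simp [List.length_drop]

def replace_bad_with_good (text : String) : String :=
  String.ofList (pvLoopA text.toList)

-- ===== PORT B =====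
-- "good".join(text.split("bad"))
def replace_bad_with_good_alt (text : String) : String :=
  String.ofList (PySem.Chars.join "good".toList (PySem.Chars.splitOn text.toList "bad".toList))

-- ===== PRECONDITION & SPEC =====
def Spec_replace_bad_with_good (text : String) (out : String) : Prop := out = replace_bad_with_good_alt text
instance (text : String) (out : String) : Decidable (Spec_replace_bad_with_good text out) := by unfold Spec_replace_bad_with_good; infer_instance

-- ===== CLAIM (what is proved, stated in full; the proofs are below) =====
def Claim_equal_replace_bad_with_good : Prop := ∀ (text : String), Dom_replace_bad_with_good text → Spec_replace_bad_with_good text (replace_bad_with_good text)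

-- ===== LEMMAS AND PROOFS =====

-- reference recursion: split the suffix l, cur holding the reversed pending segment
def pvCore : List Char → List Char → List (List Char)
  | [], cur => [cur.reverse]
  | c :: rest, cur =>
    if ['b', 'a', 'd'].isPrefixOf (c :: rest) then
      cur.reverse :: pvCore ((c :: rest).drop 3) []
    else
      pvCore rest (c :: cur)
  termination_by l _ => l.length
  decreasing_by
    all_goals simp [List.length_drop]

theorem slice3_eq_take (c : Char) (rest : List Char) :
    PySem.List.slice (c :: rest) (some 0) (some 3) = (c :: rest).take 3 := by
  have : PySem.List.slice (c :: rest) (some ((0 : Nat) : Int)) (some ((3 : Nat) : Int))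
      = List.take (3 - 0) (List.drop 0 (c :: rest)) := PySem.List.slice_natCast (c :: rest) 0 3
  simpa using this

theorem go_eq_core (fuel : Nat) (l cur : List Char) (acc : List (List Char))
    (h : l.length < fuel) :
    PySem.Chars.splitOn.go ['b', 'a', 'd'] fuel l cur acc = acc.reverse ++ pvCore l cur := by
  induction fuel generalizing l cur acc with
  | zero => omega
  | succ fuel ih =>
    cases l with
    | nil => rw [PySem.Chars.splitOn.go.eq_def]; simp [pvCore]
    | cons c rest =>
      rw [PySem.Chars.splitOn.go.eq_def]
      simp only []
      by_cases hp : ['b', 'a', 'd'].isPrefixOf (c :: rest) = true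
      · obtain ⟨t, ht⟩ := List.isPrefixOf_iff_prefix.mp hp
        rw [if_pos hp, ih _ _ _ (by rw [← ht] at h ⊢; simp at h ⊢; omega)]
        rw [pvCore, if_pos hp]
        simp
      · rw [if_neg hp, ih _ _ _ (by simp at h ⊢; omega)]
        rw [pvCore, if_neg hp]

theorem pvCore_ne_nil (l cur : List Char) : pvCore l cur ≠ [] := by
  induction l, cur using pvCore.induct with
  | case1 cur => simp [pvCore]
  | case2 c rest cur hp ih => rw [pvCore, if_pos hp]; simp
  | case3 c rest cur hp ih => rw [pvCore, if_neg hp]; exact ih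

theorem core_join (l cur : List Char) :
    PySem.Chars.join "good".toList (pvCore l cur) = cur.reverse ++ pvLoopA l := by
  induction l, cur using pvCore.induct with
  | case1 cur =>
    rw [pvCore, pvLoopA, PySem.Chars.join_singleton]
    simp
  | case2 c rest cur hp ih =>
    obtain ⟨t, ht⟩ := List.isPrefixOf_iff_prefix.mp hp
    rw [pvCore, if_pos hp, pvLoopA]
    rw [if_pos (by rw [slice3_eq_take, ← ht]; rfl)]
    have hdrop : rest.drop 2 = (c :: rest).drop 3 := rfl
    rw [hdrop]
    obtain ⟨y, ys, hys⟩ := List.exists_cons_of_ne_nil (pvCore_ne_nil ((c :: rest).drop 3) [])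
    rw [hys, PySem.Chars.join_cons_cons, ← hys, ih]
    simp
  | case3 c rest cur hp ih =>
    rw [pvCore, if_neg hp, pvLoopA]
    rw [if_neg (by
      intro hsl
      apply hp
      apply List.isPrefixOf_iff_prefix.mpr
      rw [List.prefix_iff_eq_take, show (['b', 'a', 'd'] : List Char).length = 3 from rfl,
        ← slice3_eq_take, hsl])]
    rw [ih]
    simp

theorem loopA_eq_split_join (cs : List Char) :
    pvLoopA cs = PySem.Chars.join "good".toList (PySem.Chars.splitOn cs "bad".toList) := by
  rw [show "bad".toList = ['b', 'a', 'd'] from rfl, PySem.Chars.splitOn,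
    go_eq_core _ _ _ _ (by omega)]
  simp only [List.reverse_nil, List.nil_append]
  rw [core_join]
  simp

-- ===== VERDICT (by name: the statement is the Claim_ definition above) =====
theorem replace_bad_with_good_spec : Claim_equal_replace_bad_with_good := by
  intro text _
  unfold Spec_replace_bad_with_good replace_bad_with_good replace_bad_with_good_alt
  rw [loopA_eq_split_join]
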